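-- pv_equiv track=rewrite | github.com/Logicrithm/VidSummizer | preprocess.py | detect_domain
-- ===== SOURCE A (Python) =====
-- from collections import Counter
-- from typing import List, Tuple, Dict
--
-- DOMAINS = {
--     'tech': [
--         'code', 'api', 'server', 'python', 'javascript', 'docker', 'cloud',
--         'database', 'frontend', 'backend', 'deploy', 'git', 'framework',
--         'algorithm', 'data', 'function', 'class', 'method', 'variable'
--     ],
--     'science': [
--         'neutron', 'atom', 'experiment', 'theory', 'particle', 'math',
--         'molecule', 'research', 'hypothesis', 'data', 'study', 'result',
--         'evidence', 'analysis', 'observation', 'conclusion', 'proof'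
--     ],
--     'business': [
--         'revenue', 'market', 'customer', 'profit', 'strategy', 'growth',
--         'sales', 'company', 'investor', 'startup', 'metrics', 'roi',
--         'business', 'product', 'management', 'marketing', 'brand'
--     ],
--     'history': [
--         'tsar', 'war', 'century', 'empire', 'revolution', 'dynasty',
--         'battle', 'treaty', 'civilization', 'ancient', 'medieval',
--         'king', 'queen', 'period', 'era', 'historical'
--     ],
--     'tutorial': [
--         'step', 'click', 'install', 'open', 'first', 'next', 'download',
--         'guide', 'how', 'setup', 'configure', 'follow', 'tutorial',
--         'then', 'now', 'finally', 'start', 'begin'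
--     ],
--     'economics': [
--         'economics', 'economy', 'market', 'price', 'supply', 'demand',
--         'trade', 'inflation', 'gdp', 'tax', 'government', 'money',
--         'currency', 'bank', 'interest', 'debt', 'fiscal', 'policy'
--     ],
--     'general': [
--         'people', 'time', 'work', 'life', 'day', 'world', 'think', 'know',
--         'thing', 'way', 'year', 'make', 'good', 'new', 'want'
--     ]
-- }
--
-- def detect_domain(words: List[str]) -> str:
--     """
--     Fast domain detection using word frequency matching
--
--     Algorithm:
--     1. Count word frequencies
--     2. Get top-30 most common words
--     3. Score each domain by keyword overlap
--     4. Return highest scoring domain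
--
--     Time: O(n + k) where k=domains
--     Accuracy: 85%+ on typical transcripts
--
--     Args:
--         words: List of words from text
--
--     Returns:
--         Domain name (tech/science/business/history/tutorial/economics/general)
--     """
--     # Normalize and filter
--     words = [w.lower() for w in words if len(w) > 3]
--
--     # Get top-30 frequent words
--     freq_counter = Counter(words)
--     freq_words = set([w for w, c in freq_counter.most_common(30)])
--
--     # Score each domain
--     scores = {}
--     for domain, keywords in DOMAINS.items():
--         scores[domain] = sum(1 for kw in keywords if kw in freq_words)
--
--     # Return best match
--     detected = max(scores, key=scores.get)
--
--     return detected
-- ===== SOURCE B (Python) =====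
-- # B: precomputed inverted keyword->domains index consulted once per top word,
-- # plus an explicit first-maximum scan, instead of A's per-domain keyword scans and builtin max.
-- from typing import List
--
-- _NAMES = ['tech', 'science', 'business', 'history', 'tutorial', 'economics', 'general']
--
-- _INDEX = {
--     'code': ['tech'],
--     'api': ['tech'],
--     'server': ['tech'],
--     'python': ['tech'],
--     'javascript': ['tech'],
--     'docker': ['tech'],
--     'cloud': ['tech'],
--     'database': ['tech'],
--     'frontend': ['tech'],
--     'backend': ['tech'],
--     'deploy': ['tech'],
--     'git': ['tech'],
--     'framework': ['tech'],
--     'algorithm': ['tech'],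
--     'data': ['tech', 'science'],
--     'function': ['tech'],
--     'class': ['tech'],
--     'method': ['tech'],
--     'variable': ['tech'],
--     'neutron': ['science'],
--     'atom': ['science'],
--     'experiment': ['science'],
--     'theory': ['science'],
--     'particle': ['science'],
--     'math': ['science'],
--     'molecule': ['science'],
--     'research': ['science'],
--     'hypothesis': ['science'],
--     'study': ['science'],
--     'result': ['science'],
--     'evidence': ['science'],
--     'analysis': ['science'],
--     'observation': ['science'],
--     'conclusion': ['science'],
--     'proof': ['science'],
--     'revenue': ['business'],
--     'market': ['business', 'economics'],
--     'customer': ['business'],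
--     'profit': ['business'],
--     'strategy': ['business'],
--     'growth': ['business'],
--     'sales': ['business'],
--     'company': ['business'],
--     'investor': ['business'],
--     'startup': ['business'],
--     'metrics': ['business'],
--     'roi': ['business'],
--     'business': ['business'],
--     'product': ['business'],
--     'management': ['business'],
--     'marketing': ['business'],
--     'brand': ['business'],
--     'tsar': ['history'],
--     'war': ['history'],
--     'century': ['history'],
--     'empire': ['history'],
--     'revolution': ['history'],
--     'dynasty': ['history'],
--     'battle': ['history'],
--     'treaty': ['history'],
--     'civilization': ['history'],
--     'ancient': ['history'],
--     'medieval': ['history'],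
--     'king': ['history'],
--     'queen': ['history'],
--     'period': ['history'],
--     'era': ['history'],
--     'historical': ['history'],
--     'step': ['tutorial'],
--     'click': ['tutorial'],
--     'install': ['tutorial'],
--     'open': ['tutorial'],
--     'first': ['tutorial'],
--     'next': ['tutorial'],
--     'download': ['tutorial'],
--     'guide': ['tutorial'],
--     'how': ['tutorial'],
--     'setup': ['tutorial'],
--     'configure': ['tutorial'],
--     'follow': ['tutorial'],
--     'tutorial': ['tutorial'],
--     'then': ['tutorial'],
--     'now': ['tutorial'],
--     'finally': ['tutorial'],
--     'start': ['tutorial'],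
--     'begin': ['tutorial'],
--     'economics': ['economics'],
--     'economy': ['economics'],
--     'price': ['economics'],
--     'supply': ['economics'],
--     'demand': ['economics'],
--     'trade': ['economics'],
--     'inflation': ['economics'],
--     'gdp': ['economics'],
--     'tax': ['economics'],
--     'government': ['economics'],
--     'money': ['economics'],
--     'currency': ['economics'],
--     'bank': ['economics'],
--     'interest': ['economics'],
--     'debt': ['economics'],
--     'fiscal': ['economics'],
--     'policy': ['economics'],
--     'people': ['general'],
--     'time': ['general'],
--     'work': ['general'],
--     'life': ['general'],
--     'day': ['general'],
--     'world': ['general'],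
--     'think': ['general'],
--     'know': ['general'],
--     'thing': ['general'],
--     'way': ['general'],
--     'year': ['general'],
--     'make': ['general'],
--     'good': ['general'],
--     'new': ['general'],
--     'want': ['general']
-- }
--
-- def detect_domain(words):
--     # tally the lowercased words longer than 3 characters
--     tally = {}
--     for word in words:
--         if len(word) > 3:
--             key = word.lower()
--             tally[key] = tally.get(key, 0) + 1
--     # top-30 by frequency (stable sort: ties keep first-insertion order, like most_common)
--     top = sorted(tally.items(), key=lambda e: e[1], reverse=True)[:30]
--     # score through the inverted index: one lookup per top word
--     score = {name: 0 for name in _NAMES}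
--     for word, _ in top:
--         for name in _INDEX.get(word, []):
--             score[name] += 1
--     # first-maximum scan over the fixed domain order (what max(scores, key=scores.get) picks)
--     winner = _NAMES[0]
--     best = score[winner]
--     for name in _NAMES[1:]:
--         if score[name] > best:
--             winner = name
--             best = score[name]
--     return winner
-- ===== Notes on version B (the rewrite author's own statement) =====
-- stated objective: alternative
-- what changed: B replaces A's per-domain scan of every keyword list against the top-word set by a precomputed inverted keyword-to-domains table consulted once per top word, counts with a plain dict instead of Counter, and picks the winner with an explicit first-maximum scan over the fixed domain order instead of builtin max, so ties and the empty input resolve identically.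
import Mathlib
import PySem

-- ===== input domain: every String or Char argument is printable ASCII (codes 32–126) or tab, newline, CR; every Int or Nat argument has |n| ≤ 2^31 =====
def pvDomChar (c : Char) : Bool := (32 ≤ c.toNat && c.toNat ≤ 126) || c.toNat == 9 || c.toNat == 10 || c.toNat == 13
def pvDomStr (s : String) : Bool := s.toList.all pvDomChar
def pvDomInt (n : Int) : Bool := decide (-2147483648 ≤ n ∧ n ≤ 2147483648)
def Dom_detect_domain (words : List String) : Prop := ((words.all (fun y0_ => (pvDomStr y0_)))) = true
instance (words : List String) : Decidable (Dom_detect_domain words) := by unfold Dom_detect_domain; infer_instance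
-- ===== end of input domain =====

-- B scores the domains through a precomputed inverted keyword->domains table consulted once per
-- top word and picks the winner with an explicit first-maximum scan, instead of A's scan of every
-- domain's keyword list against the top-word set and builtin max (objective: alternative).

set_option maxRecDepth 40000


-- ===== PORT A =====
def pvDOMAINS : List (String × List String) := [
  ("tech", ["code", "api", "server", "python", "javascript", "docker", "cloud",
    "database", "frontend", "backend", "deploy", "git", "framework",
    "algorithm", "data", "function", "class", "method", "variable"]),
  ("science", ["neutron", "atom", "experiment", "theory", "particle", "math",
    "molecule", "research", "hypothesis", "data", "study", "result",
    "evidence", "analysis", "observation", "conclusion", "proof"]),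
  ("business", ["revenue", "market", "customer", "profit", "strategy", "growth",
    "sales", "company", "investor", "startup", "metrics", "roi",
    "business", "product", "management", "marketing", "brand"]),
  ("history", ["tsar", "war", "century", "empire", "revolution", "dynasty",
    "battle", "treaty", "civilization", "ancient", "medieval",
    "king", "queen", "period", "era", "historical"]),
  ("tutorial", ["step", "click", "install", "open", "first", "next", "download",
    "guide", "how", "setup", "configure", "follow", "tutorial",
    "then", "now", "finally", "start", "begin"]),
  ("economics", ["economics", "economy", "market", "price", "supply", "demand",
    "trade", "inflation", "gdp", "tax", "government", "money",
    "currency", "bank", "interest", "debt", "fiscal", "policy"]),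
  ("general", ["people", "time", "work", "life", "day", "world", "think", "know",
    "thing", "way", "year", "make", "good", "new", "want"])]

def detect_domain (words : List String) : String :=
  -- words = [w.lower() for w in words if len(w) > 3]
  let ws := (words.filter (fun w => 3 < PySem.Str.len w)).map PySem.Str.lower
  -- freq_counter = Counter(words)
  let freq_counter := PySem.Dict.counter ws
  -- freq_words = set([w for w, c in freq_counter.most_common(30)])
  -- (most_common(30) = items sorted by count, descending, stable; ported as sorted … true |>.take 30)
  let freq_words : PySem.Set String :=
    PySem.Set.ofList (((PySem.List.sorted freq_counter.items (fun p => p.2) true).take 30).map (fun p => p.1))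
  -- scores[domain] = sum(1 for kw in keywords if kw in freq_words)
  let scores := pvDOMAINS.foldl
    (fun sc dk => sc.insert dk.1
      (dk.2.foldl (fun acc kw => if PySem.Set.contains freq_words kw then acc + 1 else acc) (0 : Int)))
    PySem.Dict.empty
  -- max(scores, key=scores.get)  (scores is never empty, so max never raises)
  ((PySem.List.max? scores.keys (fun k => scores.getD k 0)).getD "")

-- ===== PORT B =====
-- _NAMES: the domain names, in order
def pvNames : List String := ["tech", "science", "business", "history", "tutorial", "economics", "general"]

-- _INDEX: the precomputed inverted keyword -> domains table (a module-level dict literal in Source B)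
def pvIndex : PySem.Dict String (List String) := PySem.Dict.mk [
  ("code", ["tech"]),
  ("api", ["tech"]),
  ("server", ["tech"]),
  ("python", ["tech"]),
  ("javascript", ["tech"]),
  ("docker", ["tech"]),
  ("cloud", ["tech"]),
  ("database", ["tech"]),
  ("frontend", ["tech"]),
  ("backend", ["tech"]),
  ("deploy", ["tech"]),
  ("git", ["tech"]),
  ("framework", ["tech"]),
  ("algorithm", ["tech"]),
  ("data", ["tech", "science"]),
  ("function", ["tech"]),
  ("class", ["tech"]),
  ("method", ["tech"]),
  ("variable", ["tech"]),
  ("neutron", ["science"]),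
  ("atom", ["science"]),
  ("experiment", ["science"]),
  ("theory", ["science"]),
  ("particle", ["science"]),
  ("math", ["science"]),
  ("molecule", ["science"]),
  ("research", ["science"]),
  ("hypothesis", ["science"]),
  ("study", ["science"]),
  ("result", ["science"]),
  ("evidence", ["science"]),
  ("analysis", ["science"]),
  ("observation", ["science"]),
  ("conclusion", ["science"]),
  ("proof", ["science"]),
  ("revenue", ["business"]),
  ("market", ["business", "economics"]),
  ("customer", ["business"]),
  ("profit", ["business"]),
  ("strategy", ["business"]),
  ("growth", ["business"]),
  ("sales", ["business"]),
  ("company", ["business"]),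
  ("investor", ["business"]),
  ("startup", ["business"]),
  ("metrics", ["business"]),
  ("roi", ["business"]),
  ("business", ["business"]),
  ("product", ["business"]),
  ("management", ["business"]),
  ("marketing", ["business"]),
  ("brand", ["business"]),
  ("tsar", ["history"]),
  ("war", ["history"]),
  ("century", ["history"]),
  ("empire", ["history"]),
  ("revolution", ["history"]),
  ("dynasty", ["history"]),
  ("battle", ["history"]),
  ("treaty", ["history"]),
  ("civilization", ["history"]),
  ("ancient", ["history"]),
  ("medieval", ["history"]),
  ("king", ["history"]),
  ("queen", ["history"]),
  ("period", ["history"]),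
  ("era", ["history"]),
  ("historical", ["history"]),
  ("step", ["tutorial"]),
  ("click", ["tutorial"]),
  ("install", ["tutorial"]),
  ("open", ["tutorial"]),
  ("first", ["tutorial"]),
  ("next", ["tutorial"]),
  ("download", ["tutorial"]),
  ("guide", ["tutorial"]),
  ("how", ["tutorial"]),
  ("setup", ["tutorial"]),
  ("configure", ["tutorial"]),
  ("follow", ["tutorial"]),
  ("tutorial", ["tutorial"]),
  ("then", ["tutorial"]),
  ("now", ["tutorial"]),
  ("finally", ["tutorial"]),
  ("start", ["tutorial"]),
  ("begin", ["tutorial"]),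
  ("economics", ["economics"]),
  ("economy", ["economics"]),
  ("price", ["economics"]),
  ("supply", ["economics"]),
  ("demand", ["economics"]),
  ("trade", ["economics"]),
  ("inflation", ["economics"]),
  ("gdp", ["economics"]),
  ("tax", ["economics"]),
  ("government", ["economics"]),
  ("money", ["economics"]),
  ("currency", ["economics"]),
  ("bank", ["economics"]),
  ("interest", ["economics"]),
  ("debt", ["economics"]),
  ("fiscal", ["economics"]),
  ("policy", ["economics"]),
  ("people", ["general"]),
  ("time", ["general"]),
  ("work", ["general"]),
  ("life", ["general"]),
  ("day", ["general"]),
  ("world", ["general"]),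
  ("think", ["general"]),
  ("know", ["general"]),
  ("thing", ["general"]),
  ("way", ["general"]),
  ("year", ["general"]),
  ("make", ["general"]),
  ("good", ["general"]),
  ("new", ["general"]),
  ("want", ["general"])]

def detect_domain_alt (words : List String) : String :=
  -- tally the lowercased words longer than 3 characters
  let tally := words.foldl
    (fun t word => if 3 < PySem.Str.len word
      then t.insert (PySem.Str.lower word) (t.getD (PySem.Str.lower word) 0 + 1) else t)
    (PySem.Dict.empty : PySem.Dict String Int)
  -- top-30 by frequency (stable descending sort, then [:30])
  let top := (PySem.List.sorted tally.items (fun e => e.2) true).take 30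
  -- score = {name: 0 for name in _NAMES}, then one index lookup per top word
  let score := top.foldl
    (fun s e => (pvIndex.getD e.1 []).foldl (fun s name => s.modify name 0 (fun v => v + 1)) s)
    (pvNames.foldl (fun s name => s.insert name (0 : Int)) PySem.Dict.empty)
  -- first-maximum scan over _NAMES (winner = _NAMES[0]; for name in _NAMES[1:]: …)
  let winner0 := (PySem.List.pyGet? pvNames 0).getD ""
  ((PySem.List.slice pvNames (some 1) none).foldl
    (fun (w : String × Int) name => if score.getD name 0 > w.2 then (name, score.getD name 0) else w)
    (winner0, score.getD winner0 0)).1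

-- ===== PRECONDITION & SPEC =====
def Spec_detect_domain (words : List String) (out : String) : Prop := out = detect_domain_alt words
instance (words : List String) (out : String) : Decidable (Spec_detect_domain words out) := by unfold Spec_detect_domain; infer_instance

-- ===== CLAIM (what is proved, stated in full; the proofs are below) =====
def Claim_equal_detect_domain : Prop := ∀ (words : List String), Dom_detect_domain words → Spec_detect_domain words (detect_domain words)

-- ===== LEMMAS AND PROOFS =====

-- B's tally loop builds exactly Counter([w.lower() for w in words if len(w) > 3])
lemma counts_eq_counter (words : List String) :
    words.foldl
      (fun t word => if 3 < PySem.Str.len word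
        then t.insert (PySem.Str.lower word) (t.getD (PySem.Str.lower word) 0 + 1) else t)
      PySem.Dict.empty
    = PySem.Dict.counter ((words.filter (fun w => 3 < PySem.Str.len w)).map PySem.Str.lower) := by
  rw [PySem.List.foldl_ite_eq_foldl_filter, ← PySem.Dict.foldl_insert_getD_add_one_eq_counter,
    List.foldl_map]

-- the literal inverted table is the grouping of (keyword, domain) pairs drawn from pvDOMAINS
lemma pvIndex_eq :
    pvIndex = (pvDOMAINS.flatMap (fun r => r.2.map (fun kw => (kw, r.1)))).foldl
      (fun idx q => idx.modify q.1 [] (fun l => l ++ [q.2])) PySem.Dict.empty := by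
  decide

-- the inverted table, looked up at any key
lemma index_getD (kw : String) :
    pvIndex.getD kw []
      = pvDOMAINS.flatMap (fun r => (r.2.filter (fun k => k == kw)).map (fun _ => r.1)) := by
  rw [pvIndex_eq, PySem.Dict.getD_foldl_modify_append]
  simp [PySem.Dict.getD_empty, List.filter_flatMap, List.map_flatMap, List.filter_map,
    Function.comp_def, List.map_const']

-- every domain name in the table is a key of pvDOMAINS
lemma mem_index_getD {kw d : String} (h : d ∈ pvIndex.getD kw []) :
    d ∈ pvDOMAINS.map (fun r => r.1) := by
  rw [index_getD] at h
  simp only [List.mem_flatMap, List.mem_map] at h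
  obtain ⟨r, hr, _, _, rfl⟩ := h
  exact List.mem_map.2 ⟨r, hr, rfl⟩

-- count of a fixed domain name in a table entry
lemma count_index_getD (kw name : String) :
    (pvIndex.getD kw []).count name
      = (pvDOMAINS.map (fun r => if r.1 = name then r.2.count kw else 0)).sum := by
  rw [index_getD]
  induction pvDOMAINS with
  | nil => simp
  | cons r t ih =>
    simp only [List.flatMap_cons, List.count_append, List.map_cons, List.sum_cons, ih]
    congr 1
    rw [List.map_const']
    by_cases h : r.1 = name
    · subst h; simp [List.count_eq_length_filter]
    · simp [List.count_replicate, h]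

-- B's double loop: keys are preserved
lemma keys_double_fold (top : List (String × Int)) (sc : PySem.Dict String Int)
    (h : sc.keys = pvDOMAINS.map (fun r => r.1)) :
    (top.foldl
      (fun s e => (pvIndex.getD e.1 []).foldl (fun s name => s.modify name 0 (fun v => v + 1)) s)
      sc).keys = pvDOMAINS.map (fun r => r.1) := by
  induction top generalizing sc with
  | nil => exact h
  | cons p t ih =>
    apply ih
    rw [PySem.Dict.keys_foldl_modify, PySem.Set.update_eq_append_filter, h]
    rw [List.filter_eq_nil_iff.2, List.append_nil]
    intro a ha
    have hm : a ∈ pvDOMAINS.map (fun r => r.1) := mem_index_getD ((PySem.Set.mem_ofList _ _).1 ha)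
    intro hb
    rw [Bool.not_eq_true'] at hb
    exact absurd ((PySem.Set.contains_iff _ _).2 hm) (by rw [hb]; simp)

-- B's double loop: value at a name
lemma getD_double_fold (top : List (String × Int)) (sc : PySem.Dict String Int) (name : String) :
    (top.foldl
      (fun s e => (pvIndex.getD e.1 []).foldl (fun s name => s.modify name 0 (fun v => v + 1)) s)
      sc).getD name 0
    = sc.getD name 0 + (top.map (fun p => ((pvIndex.getD p.1 []).count name : Int))).sum := by
  induction top generalizing sc with
  | nil => simp
  | cons p t ih =>
    simp only [List.foldl_cons, List.map_cons, List.sum_cons, ih,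
      PySem.Dict.getD_foldl_modify_add_one]
    ring

-- symmetric intersection count for Nodup lists
lemma countP_mem_comm {l1 l2 : List String} (h1 : l1.Nodup) (h2 : l2.Nodup) :
    l1.countP (fun x => decide (x ∈ l2)) = l2.countP (fun x => decide (x ∈ l1)) := by
  rw [List.countP_eq_length_filter, List.countP_eq_length_filter]
  apply List.Perm.length_eq
  apply (List.perm_ext_iff_of_nodup (h1.filter _) (h2.filter _)).2
  intro a
  simp only [List.mem_filter, decide_eq_true_eq]
  exact and_comm

lemma count_nodup (l : List String) (h : l.Nodup) (a : String) :
    l.count a = if a ∈ l then 1 else 0 := by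
  by_cases hm : a ∈ l
  · simp [hm, List.count_eq_one_of_mem h hm]
  · simp [hm, List.count_eq_zero_of_not_mem hm]

-- summing keyword-list counts over the top pairs is counting top words inside the keyword list
lemma sum_count (kws : List String) (hk : kws.Nodup) (top : List (String × Int)) :
    (top.map (fun p => ((kws.count p.1 : Int)))).sum
      = ((top.map (fun p => p.1)).countP (fun w => decide (w ∈ kws)) : Int) := by
  induction top with
  | nil => simp
  | cons p t ih =>
    simp only [List.map_cons, List.sum_cons, ih, List.countP_cons]
    rw [count_nodup kws hk p.1]
    by_cases h : p.1 ∈ kws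
    · simp [h]; ring
    · simp [h]

-- membership in the set of top words, as a Bool predicate
lemma contains_ofList_eq (tk : List String) (x : String) :
    PySem.Set.contains (PySem.Set.ofList tk) x = decide (x ∈ tk) := by
  by_cases h : x ∈ tk
  · simp [h]
  · have hc : ¬ (PySem.Set.contains (PySem.Set.ofList tk) x = true) :=
      fun hc => h ((PySem.Set.mem_ofList _ _).1 ((PySem.Set.contains_iff _ _).1 hc))
    rw [Bool.not_eq_true] at hc
    simp [h]

-- B's score of one domain row equals A's keyword scan of that row
lemma perrow (top : List (String × Int)) (hnd : (top.map (fun p => p.1)).Nodup)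
    (name : String) (kws : List String) (hk : kws.Nodup)
    (h0 : (pvNames.foldl (fun s name => s.insert name (0 : Int)) PySem.Dict.empty).getD name 0 = 0)
    (hc : ∀ kw, ((pvIndex.getD kw []).count name) = kws.count kw) :
    (top.foldl
      (fun s e => (pvIndex.getD e.1 []).foldl (fun s name => s.modify name 0 (fun v => v + 1)) s)
      (pvNames.foldl (fun s name => s.insert name (0 : Int)) PySem.Dict.empty)).getD name 0
    = kws.foldl
        (fun acc kw => if PySem.Set.contains (PySem.Set.ofList (top.map (fun p => p.1))) kw
          then acc + 1 else acc) (0 : Int) := by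
  rw [getD_double_fold, h0, zero_add, PySem.List.foldl_if_add_one, zero_add]
  simp only [hc]
  rw [sum_count kws hk top]
  congr 1
  rw [← countP_mem_comm hk hnd]
  apply List.countP_congr
  intro x _
  rw [contains_ofList_eq]

-- the two score dictionaries coincide
lemma scores_eq (top : List (String × Int)) (hnd : (top.map (fun p => p.1)).Nodup) :
    pvDOMAINS.foldl
      (fun sc dk => sc.insert dk.1
        (dk.2.foldl (fun acc kw => if PySem.Set.contains (PySem.Set.ofList (top.map (fun p => p.1))) kw
          then acc + 1 else acc) (0 : Int)))
      PySem.Dict.empty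
    = top.foldl
        (fun s e => (pvIndex.getD e.1 []).foldl (fun s name => s.modify name 0 (fun v => v + 1)) s)
        (pvNames.foldl (fun s name => s.insert name (0 : Int)) PySem.Dict.empty) := by
  apply PySem.Dict.ext
  have hkeys := keys_double_fold top
    (pvNames.foldl (fun s name => s.insert name (0 : Int)) PySem.Dict.empty) (by decide)
  have hnod : (top.foldl
      (fun s e => (pvIndex.getD e.1 []).foldl (fun s name => s.modify name 0 (fun v => v + 1)) s)
      (pvNames.foldl (fun s name => s.insert name (0 : Int)) PySem.Dict.empty)).keys.Nodup := by
    rw [hkeys]; decide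
  rw [PySem.Dict.items_foldl_insert_fresh pvDOMAINS (fun dk => dk.1) _ PySem.Dict.empty
    (fun a _ => by simp) (by decide)]
  have hemp : (PySem.Dict.empty : PySem.Dict String Int).items = [] := rfl
  rw [hemp, List.nil_append]
  rw [PySem.Dict.items_eq_map_keys _ hnod 0, hkeys, List.map_map]
  apply List.map_congr_left
  intro r hr
  simp only [Function.comp_apply, Prod.mk.injEq, true_and]
  simp only [pvDOMAINS, List.mem_cons, List.not_mem_nil, or_false] at hr
  rcases hr with rfl | rfl | rfl | rfl | rfl | rfl | rfl <;>
    exact (perrow top hnd _ _ (by decide) (by decide)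
      (fun kw => by rw [count_index_getD]; simp [pvDOMAINS])).symm

-- B's first-maximum pair scan computes Python's max(…, key=…) (= PySem.List.max? of the cons list)
lemma foldpair (g : String → Int) (l : List String) (m : String) :
    (l.foldl (fun (w : String × Int) name => if g name > w.2 then (name, g name) else w) (m, g m)).1
    = (PySem.List.max? (m :: l) g).getD "" := by
  induction l generalizing m with
  | nil => rfl
  | cons x t ih =>
    have hmax : PySem.List.max? (m :: x :: t) g
        = PySem.List.max? ((if g m < g x then x else m) :: t) g := by
      simp only [PySem.List.max?, List.foldl]
      by_cases h : g m < g x <;> simp [h]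
    rw [hmax]
    simp only [List.foldl]
    by_cases h : g m < g x
    · rw [if_pos (show g x > (m, g m).2 from h), if_pos h]
      exact ih x
    · rw [if_neg (show ¬ g x > (m, g m).2 from h), if_neg h]
      exact ih m

-- the scan over the fixed name list against max? over the same 7 keys
lemma argmax_eq (g : String → Int) :
    ((PySem.List.slice pvNames (some 1) none).foldl
      (fun (w : String × Int) name => if g name > w.2 then (name, g name) else w)
      (((PySem.List.pyGet? pvNames 0).getD ""), g ((PySem.List.pyGet? pvNames 0).getD ""))).1
    = (PySem.List.max? pvNames g).getD "" := by
  have h1 : PySem.List.slice pvNames (some 1) none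
      = ["science", "business", "history", "tutorial", "economics", "general"] := by decide
  have h2 : (PySem.List.pyGet? pvNames 0).getD "" = "tech" := by decide
  rw [h1, h2, foldpair g _ "tech"]
  rfl

-- ===== VERDICT (by name: the statement is the Claim_ definition above) =====
theorem detect_domain_spec : Claim_equal_detect_domain := by
  intro words _
  unfold Spec_detect_domain
  simp only [detect_domain, detect_domain_alt]
  simp only [counts_eq_counter]
  have hnd : (((PySem.List.sorted
      (PySem.Dict.counter ((words.filter (fun w => 3 < PySem.Str.len w)).map PySem.Str.lower)).items
      (fun p => p.2) true).take 30).map (fun p => p.1)).Nodup := by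
    rw [List.map_take]
    apply List.Nodup.sublist (List.take_sublist _ _)
    have hperm := (PySem.List.sorted_perm
      (PySem.Dict.counter ((words.filter (fun w => 3 < PySem.Str.len w)).map PySem.Str.lower)).items
      (fun p => p.2) true).map (fun p => p.1)
    rw [hperm.nodup_iff]
    exact PySem.Dict.nodup_keys_counter _
  rw [scores_eq _ hnd]
  rw [keys_double_fold _ _ (by decide)]
  exact (argmax_eq _).symm
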